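-- pv_equiv track=rewrite | github.com/Tinesh77/MediAssist | Assistant/services/chunking.py | _word_char_map
-- ===== SOURCE A (Python) =====
-- def _word_char_map(text: str) -> list[int]:
--     """Return the start character position of each whitespace-delimited word."""
--     positions = []
--     in_word = False
--     for i, ch in enumerate(text):
--         if ch not in (" ", "\n", "\t"):
--             if not in_word:
--                 positions.append(i)
--                 in_word = True
--         else:
--             in_word = False
--     return positions
-- ===== SOURCE B (Python) =====
-- def _word_char_map(text: str) -> list[int]:
--     """Return the start character position of each whitespace-delimited word."""
--     seps = (" ", "\n", "\t")
--     prevs = " " + text[:-1]  # each position paired with the character before it (virtual separator before index 0)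
--     return [i for i, (prev, ch) in enumerate(zip(prevs, text))
--             if ch not in seps and prev in seps]
-- ===== Notes on version B (the rewrite author's own statement) =====
-- stated objective: alternative
-- what changed: Replaced A's sequential in_word state machine by a stateless boundary filter: B zips the text with a one-shifted copy of itself (virtual separator before index 0) and keeps exactly the indices where a non-separator character follows a separator.
import Mathlib
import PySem

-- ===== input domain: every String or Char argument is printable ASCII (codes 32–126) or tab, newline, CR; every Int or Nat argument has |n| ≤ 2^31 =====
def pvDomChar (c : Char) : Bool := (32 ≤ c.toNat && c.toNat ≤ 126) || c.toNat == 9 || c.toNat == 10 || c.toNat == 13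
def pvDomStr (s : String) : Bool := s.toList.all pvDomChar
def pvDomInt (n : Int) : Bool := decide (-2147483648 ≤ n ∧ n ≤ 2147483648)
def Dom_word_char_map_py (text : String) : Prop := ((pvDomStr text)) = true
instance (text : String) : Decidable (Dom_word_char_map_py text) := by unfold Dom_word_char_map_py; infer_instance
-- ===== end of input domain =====

-- B replaces A's sequential in_word state machine by a stateless boundary filter: it pairs every
-- character with its predecessor (virtual separator before index 0) and keeps exactly the indices
-- where a non-separator follows a separator; alternative structure, same O(n) cost.

-- ===== PORT A =====
-- for i, ch in enumerate(text): flat loop carrying (positions, in_word)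
def pvALoop : List Char → Int → List Int → Bool → List Int
  | [], _, positions, _ => positions
  | ch :: rest, i, positions, inWord =>
    if ¬(ch = ' ' ∨ ch = '\n' ∨ ch = '\t') then
      if !inWord then pvALoop rest (i + 1) (positions ++ [i]) true
      else pvALoop rest (i + 1) positions true
    else pvALoop rest (i + 1) positions false

def word_char_map_py (text : String) : List Int :=
  pvALoop text.toList 0 [] false

-- ===== PORT B =====
-- ch in (" ", "\n", "\t")
def pvIsSep (c : Char) : Bool := c == ' ' || c == '\n' || c == '\t'

-- prevs = " " + text[:-1]; [i for i, (prev, ch) in enumerate(zip(prevs, text)) if ch not in seps and prev in seps]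
def word_char_map_py_alt (text : String) : List Int :=
  let cs := text.toList
  let prevs := ' ' :: cs.dropLast
  (PySem.List.enumerate (prevs.zip cs) 0).filterMap
    (fun q => if !pvIsSep q.2.2 && pvIsSep q.2.1 then some q.1 else none)

-- ===== PRECONDITION & SPEC =====
def Spec_word_char_map_py (text : String) (out : List Int) : Prop := out = word_char_map_py_alt text
instance (text : String) (out : List Int) : Decidable (Spec_word_char_map_py text out) := by unfold Spec_word_char_map_py; infer_instance

-- ===== CLAIM (what is proved, stated in full; the proofs are below) =====
def Claim_equal_word_char_map_py : Prop := ∀ (text : String), Dom_word_char_map_py text → Spec_word_char_map_py text (word_char_map_py text)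

-- ===== LEMMAS AND PROOFS =====
-- zip truncates, so the padded-and-truncated predecessor list can drop the dropLast
theorem pv_zip_dropLast (cs : List Char) : ∀ (p : Char),
    (p :: cs.dropLast).zip cs = (p :: cs).zip cs := by
  induction cs with
  | nil => intro p; rfl
  | cons c r ih =>
    intro p
    cases r with
    | nil => rfl
    | cons d t =>
      calc (p :: (c :: d :: t).dropLast).zip (c :: d :: t)
          = (p, c) :: (c :: (d :: t).dropLast).zip (d :: t) := rfl
        _ = (p, c) :: (c :: d :: t).zip (d :: t) := by rw [ih c]
        _ = (p :: c :: d :: t).zip (c :: d :: t) := rfl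

-- A's in_word flag is exactly "the previous character was not a separator"
theorem pv_key (cs : List Char) : ∀ (i : Int) (acc : List Int) (p : Char),
    pvALoop cs i acc (!pvIsSep p)
      = acc ++ (PySem.List.enumerate ((p :: cs).zip cs) i).filterMap
          (fun q => if !pvIsSep q.2.2 && pvIsSep q.2.1 then some q.1 else none) := by
  induction cs with
  | nil => intro i acc p; simp [pvALoop]
  | cons c rest ih =>
    intro i acc p
    have hz : (p :: c :: rest).zip (c :: rest) = (p, c) :: (c :: rest).zip rest :=
      List.zip_cons_cons ..
    rw [hz, PySem.List.enumerate_cons, List.filterMap_cons]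
    by_cases hc : c = ' ' ∨ c = '\n' ∨ c = '\t'
    · have hcs : pvIsSep c = true := by rcases hc with h | h | h <;> simp [pvIsSep, h]
      have hA : pvALoop (c :: rest) i acc (!pvIsSep p)
          = pvALoop rest (i + 1) acc (!pvIsSep c) := by
        simp [pvALoop, hc, hcs]
      rw [hA, ih]
      simp [hcs]
    · have hcs : pvIsSep c = false := by
        simp only [pvIsSep, Bool.or_eq_false_iff, beq_eq_false_iff_ne, ne_eq]
        exact ⟨⟨fun h => hc (Or.inl h), fun h => hc (Or.inr (Or.inl h))⟩,
               fun h => hc (Or.inr (Or.inr h))⟩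
      by_cases hp : pvIsSep p = true
      · -- word boundary: previous is a separator, current is not
        have hA : pvALoop (c :: rest) i acc (!pvIsSep p)
            = pvALoop rest (i + 1) (acc ++ [i]) (!pvIsSep c) := by
          simp [pvALoop, hc, hp, hcs]
        rw [hA, ih]
        simp [hcs, hp]
      · have hp' : pvIsSep p = false := by simpa using hp
        have hA : pvALoop (c :: rest) i acc (!pvIsSep p)
            = pvALoop rest (i + 1) acc (!pvIsSep c) := by
          simp [pvALoop, hc, hp', hcs]
        rw [hA, ih]
        simp [hcs, hp']

-- ===== VERDICT (by name: the statement is the Claim_ definition above) =====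
theorem word_char_map_py_spec : Claim_equal_word_char_map_py := by
  intro text _
  unfold Spec_word_char_map_py word_char_map_py word_char_map_py_alt
  have h := pv_key text.toList 0 [] ' '
  rw [← pv_zip_dropLast text.toList ' '] at h
  exact h
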